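-- pv_equiv track=rewrite | github.com/nmeusling/advent-of-code-2021 | whale_treachery/alternative_solution.py | get_fuel_to_align_at_position
-- ===== SOURCE A (Python) =====
-- def get_fuel_to_align_at_position(crabs, position, constant_fuel):
--     movement_counts = {}
--     for crab in crabs:
--         spaces_to_move = abs(crab - position)
--         if spaces_to_move not in movement_counts:
--             movement_counts[spaces_to_move] = 1
--         else:
--             movement_counts[spaces_to_move] += 1
--     fuel_used = 0
--     for spaces_to_move, count in movement_counts.items():
--         fuel_used += count * calculate_fuel_cost_for_movement(spaces_to_move, constant_fuel)
--     return fuel_used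
--
-- def calculate_fuel_cost_for_movement(spaces_to_move, constant_fuel):
--     if constant_fuel:
--         return spaces_to_move
--     else:
--         return sum(range(spaces_to_move + 1))
-- ===== SOURCE B (Python) =====
-- def get_fuel_to_align_at_position(crabs, position, constant_fuel):
--     fuel_used = 0
--     for crab in crabs:
--         fuel_used += calculate_fuel_cost_for_movement(abs(crab - position), constant_fuel)
--     return fuel_used
--
-- def calculate_fuel_cost_for_movement(spaces_to_move, constant_fuel):
--     if constant_fuel:
--         return spaces_to_move
--     else:
--         return sum(range(spaces_to_move + 1))
-- ===== Notes on version B (the rewrite author's own statement) =====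
-- stated objective: simpler
-- what changed: Dropped the movement_counts frequency dictionary: B accumulates the fuel cost of each crab directly in one flat loop, with the same helper kept verbatim.
import Mathlib
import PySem

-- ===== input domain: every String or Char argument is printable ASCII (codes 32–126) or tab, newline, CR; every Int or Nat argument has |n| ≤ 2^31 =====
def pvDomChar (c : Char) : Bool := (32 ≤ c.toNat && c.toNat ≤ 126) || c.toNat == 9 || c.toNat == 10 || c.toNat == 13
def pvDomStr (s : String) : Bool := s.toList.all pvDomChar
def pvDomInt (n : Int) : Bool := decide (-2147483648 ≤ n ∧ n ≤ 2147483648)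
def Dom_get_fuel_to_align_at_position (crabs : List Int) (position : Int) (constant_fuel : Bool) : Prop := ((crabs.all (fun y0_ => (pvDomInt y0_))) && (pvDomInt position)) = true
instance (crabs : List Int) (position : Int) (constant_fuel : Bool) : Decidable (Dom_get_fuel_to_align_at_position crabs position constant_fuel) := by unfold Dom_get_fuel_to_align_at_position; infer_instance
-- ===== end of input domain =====

-- B drops A's movement_counts frequency dictionary and accumulates each crab's fuel cost
-- directly in one flat loop (objective: simpler); the fuel-cost helper is kept verbatim.

-- ===== PORT A =====
-- shared helper, identical in Source A and Source B. sum(range(n+1)) is ported by hand as a left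
-- fold over 0..n (Python's sum of a range is exactly this left fold; for n+1 <= 0 the range
-- is empty and both return 0) — exact on every Int input.
def calculate_fuel_cost_for_movement (spaces_to_move : Int) (constant_fuel : Bool) : Int :=
  if constant_fuel then spaces_to_move
  else (List.range (spaces_to_move + 1).toNat).foldl (fun acc k => acc + (k : Int)) 0

def get_fuel_to_align_at_position (crabs : List Int) (position : Int) (constant_fuel : Bool) : Int :=
  let movement_counts : PySem.Dict Int Int :=
    crabs.foldl (fun d crab =>
      let spaces_to_move := |crab - position|
      if ¬ d.contains spaces_to_move then d.insert spaces_to_move 1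
      else d.insert spaces_to_move (d.getD spaces_to_move 0 + 1)) PySem.Dict.empty
  movement_counts.items.foldl
    (fun fuel_used p => fuel_used + p.2 * calculate_fuel_cost_for_movement p.1 constant_fuel) 0

-- ===== PORT B =====
def get_fuel_to_align_at_position_alt (crabs : List Int) (position : Int) (constant_fuel : Bool) : Int :=
  crabs.foldl (fun fuel_used crab =>
    fuel_used + calculate_fuel_cost_for_movement (|crab - position|) constant_fuel) 0

-- ===== PRECONDITION & SPEC =====
def Spec_get_fuel_to_align_at_position (crabs : List Int) (position : Int) (constant_fuel : Bool) (out : Int) : Prop := out = get_fuel_to_align_at_position_alt crabs position constant_fuel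
instance (crabs : List Int) (position : Int) (constant_fuel : Bool) (out : Int) : Decidable (Spec_get_fuel_to_align_at_position crabs position constant_fuel out) := by unfold Spec_get_fuel_to_align_at_position; infer_instance

-- ===== CLAIM (what is proved, stated in full; the proofs are below) =====
def Claim_equal_get_fuel_to_align_at_position : Prop := ∀ (crabs : List Int) (position : Int) (constant_fuel : Bool), Dom_get_fuel_to_align_at_position crabs position constant_fuel → Spec_get_fuel_to_align_at_position crabs position constant_fuel (get_fuel_to_align_at_position crabs position constant_fuel)

-- ===== LEMMAS AND PROOFS =====

-- A's two-branch dict update is exactly the counter update.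
theorem step_eq_counter_step (d : PySem.Dict Int Int) (s : Int) :
    (if ¬ d.contains s then d.insert s 1 else d.insert s (d.getD s 0 + 1))
      = d.insert s (d.getD s 0 + 1) := by
  by_cases h : d.contains s
  · simp [h]
  · simp only [Bool.not_eq_true] at h
    rw [PySem.Dict.getD_of_not_contains (h := h)]
    simp [h]

-- A's first loop builds Counter(distances).
theorem dict_eq_counter (crabs : List Int) (position : Int) :
    crabs.foldl (fun d crab =>
        let spaces_to_move := |crab - position|
        if ¬ d.contains spaces_to_move then d.insert spaces_to_move 1
        else d.insert spaces_to_move (d.getD spaces_to_move 0 + 1)) PySem.Dict.empty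
      = PySem.Dict.counter (crabs.map (fun crab => |crab - position|)) := by
  rw [← PySem.Dict.foldl_insert_getD_add_one_eq_counter, List.foldl_map]
  exact PySem.List.foldl_congr_mem crabs _ _ _ (fun d x _ => step_eq_counter_step d |x - position|)

-- weighted count sum over the distinct elements = plain sum over the list
theorem sum_count_mul (ds : List Int) (f : Int → Int) :
    ((PySem.Set.ofList ds).map (fun k => ((ds.count k : Int)) * f k)).sum
      = (ds.map f).sum := by
  rw [← List.sum_toFinset _ (PySem.Set.nodup_ofList ds),
      Finset.sum_list_map_count ds f]
  apply Finset.sum_congr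
  · ext x
    simp [List.mem_toFinset, PySem.Set.mem_ofList]
  · intro x _
    simp

theorem main_eq (crabs : List Int) (position : Int) (constant_fuel : Bool) :
    get_fuel_to_align_at_position crabs position constant_fuel
      = get_fuel_to_align_at_position_alt crabs position constant_fuel := by
  unfold get_fuel_to_align_at_position get_fuel_to_align_at_position_alt
  rw [dict_eq_counter, PySem.List.foldl_add, PySem.List.foldl_add,
      PySem.Dict.items_counter, List.map_map]
  simp only [Function.comp_def]
  rw [sum_count_mul (crabs.map (fun crab => |crab - position|))
        (fun k => calculate_fuel_cost_for_movement k constant_fuel), List.map_map]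
  rfl

-- ===== VERDICT (by name: the statement is the Claim_ definition above) =====
theorem get_fuel_to_align_at_position_spec : Claim_equal_get_fuel_to_align_at_position := by
  intro crabs position constant_fuel _
  unfold Spec_get_fuel_to_align_at_position
  exact main_eq crabs position constant_fuel
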